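-- pv_equiv track=rewrite | github.com/bminor/mesa-mesa | src/asahi/isa/isa.py | deposit_bits
-- ===== SOURCE A (Python) =====
-- def deposit_bits(mask, value):
--     accum = 0
--     value_i = 0
--
--     assert(mask < (1 << 128))
--     for m in range(128):
--         if mask & (1 << m):
--             if (value & (1 << value_i)) != 0:
--                 accum |= (1 << m)
--
--             value_i += 1
--
--     assert((accum & ~mask) == 0)
--     return accum
-- ===== SOURCE B (Python) =====
-- def deposit_bits(mask, value):
--     assert mask < (1 << 128)
--
--     def go(m, v, pos):
--         if m == 0:
--             return 0
--         if m & 1: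
--             return ((v & 1) << pos) | go(m >> 1, v >> 1, pos + 1)
--         return go(m >> 1, v, pos + 1)
--
--     accum = go(mask & ((1 << 128) - 1), value, 0)
--     assert (accum & ~mask) == 0
--     return accum
-- ===== Notes on version B (the rewrite author's own statement) =====
-- stated objective: alternative
-- what changed: A scans all 128 bit positions with an index loop and a separate value-bit counter; B recurses on the low-masked mask, halving mask and value together and stopping as soon as the remaining mask is zero, placing each value bit with a shift.
import Mathlib
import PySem

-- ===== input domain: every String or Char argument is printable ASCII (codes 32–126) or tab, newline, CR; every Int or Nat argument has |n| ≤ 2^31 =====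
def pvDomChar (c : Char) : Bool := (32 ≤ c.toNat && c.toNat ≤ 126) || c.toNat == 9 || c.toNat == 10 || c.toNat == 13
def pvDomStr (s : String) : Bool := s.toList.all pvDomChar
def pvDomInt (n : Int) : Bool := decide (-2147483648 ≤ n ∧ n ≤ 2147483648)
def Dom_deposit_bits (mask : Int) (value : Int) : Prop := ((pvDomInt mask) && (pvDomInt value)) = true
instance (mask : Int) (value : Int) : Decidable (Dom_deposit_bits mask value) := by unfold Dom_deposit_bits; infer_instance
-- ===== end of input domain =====

-- B replaces A's fixed scan of all 128 bit positions (with a separate value-bit counter)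
-- by a recursion that halves mask and value together and stops as soon as the remaining
-- mask is zero (objective: alternative decomposition; same asymptotic cost).
-- Both `assert`s of the Python sources always hold on Dom (|mask| ≤ 2^31 < 2^128; the
-- result's bits are a subset of mask's), so the ports omit them and no Pre_ is needed.

-- ===== PORT A =====
-- one iteration of A's `for m in range(128)` body; state = (accum, value_i)
def depositStep (mask value : Int) (s : Int × Nat) (m : Nat) : Int × Nat :=
  if PySem.Int.band mask ((1 : Int) <<< m) ≠ 0 then
    (if PySem.Int.band value ((1 : Int) <<< s.2) ≠ 0 then PySem.Int.bor s.1 ((1 : Int) <<< m)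
     else s.1,
     s.2 + 1)
  else s

def deposit_bits (mask : Int) (value : Int) : Int :=
  ((List.range 128).foldl (depositStep mask value) (0, 0)).1

-- ===== PORT B =====
-- Source B's recursion `go(m, v, pos)`; the fuel (128) is only a totality guard: the Python
-- recursion terminates because its argument m satisfies 0 ≤ m < 2^128 and is halved each call.
def depositGo : Nat → Int → Int → Nat → Int
  | 0, _, _, _ => 0
  | fuel + 1, m, v, pos =>
    if m = 0 then 0
    else if PySem.Int.band m 1 ≠ 0 then
      PySem.Int.bor ((PySem.Int.band v 1) <<< pos) (depositGo fuel (m >>> (1 : Nat)) (v >>> (1 : Nat)) (pos + 1))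
    else depositGo fuel (m >>> (1 : Nat)) v (pos + 1)

def deposit_bits_alt (mask : Int) (value : Int) : Int :=
  depositGo 128 (PySem.Int.band mask (((1 : Int) <<< (128 : Nat)) - 1)) value 0

-- ===== PRECONDITION & SPEC =====
def Spec_deposit_bits (mask : Int) (value : Int) (out : Int) : Prop := out = deposit_bits_alt mask value
instance (mask : Int) (value : Int) (out : Int) : Decidable (Spec_deposit_bits mask value out) := by unfold Spec_deposit_bits; infer_instance

-- ===== CLAIM (what is proved, stated in full; the proofs are below) =====
def Claim_equal_deposit_bits : Prop := ∀ (mask : Int) (value : Int), Dom_deposit_bits mask value → Spec_deposit_bits mask value (deposit_bits mask value)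

-- ===== LEMMAS AND PROOFS =====

lemma nat_lor_disjoint (k : Nat) (x y : Nat) (hx : x < 2 ^ k) (hy : 2 ^ k ∣ y) :
    x ||| y = x + y := by
  apply Nat.eq_of_testBit_eq
  intro j
  rw [Nat.testBit_lor, Nat.testBit_eq_decide_div_mod_eq, Nat.testBit_eq_decide_div_mod_eq,
      Nat.testBit_eq_decide_div_mod_eq]
  by_cases hj : j < k
  · -- low bits: y contributes nothing, addition does not carry into them
    obtain ⟨t, rfl⟩ := dvd_trans (pow_dvd_pow 2 (show j + 1 ≤ k by omega)) hy
    have h1 : 2 ^ (j + 1) * t = 2 ^ j * (2 * t) := by ring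
    have h2 : (2 ^ (j + 1) * t) / 2 ^ j = 2 * t := by
      rw [h1, Nat.mul_div_cancel_left _ (Nat.two_pow_pos j)]
    have h3 : (x + 2 ^ (j + 1) * t) / 2 ^ j = x / 2 ^ j + 2 * t := by
      rw [h1, Nat.add_mul_div_left _ _ (Nat.two_pow_pos j)]
    rw [h2, h3]
    by_cases hb : x / 2 ^ j % 2 = 1 <;> simp [hb]
  · -- high bits: x contributes nothing and causes no carry
    have hk : (2:Nat) ^ k ≤ 2 ^ j := Nat.pow_le_pow_right (by norm_num) (by omega)
    have hx0 : x / 2 ^ j = 0 := Nat.div_eq_of_lt (by omega)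
    have hdm : 2 ^ k ∣ y % 2 ^ j := (Nat.dvd_mod_iff (pow_dvd_pow 2 (by omega))).mpr hy
    obtain ⟨s, hs⟩ := hdm
    have hylt : y % 2 ^ j < 2 ^ j := Nat.mod_lt _ (by positivity)
    have hsk : 2 ^ k * s + 2 ^ k ≤ 2 ^ j := by
      have h2j : (2:Nat) ^ j = 2 ^ k * 2 ^ (j - k) := by
        rw [← pow_add]; congr 1; omega
      have hslt : s < 2 ^ (j - k) := by
        by_contra h
        have : 2 ^ k * 2 ^ (j - k) ≤ 2 ^ k * s := Nat.mul_le_mul_left _ (by omega)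
        omega
      calc 2 ^ k * s + 2 ^ k = 2 ^ k * (s + 1) := by ring
        _ ≤ 2 ^ k * 2 ^ (j - k) := Nat.mul_le_mul_left _ (by omega)
        _ = 2 ^ j := h2j.symm
    have hnoc : (x + y) / 2 ^ j = y / 2 ^ j := by
      conv_lhs => rw [show x + y = (x + y % 2 ^ j) + 2 ^ j * (y / 2 ^ j) by
        rw [Nat.add_assoc]; congr 1; rw [Nat.add_comm, Nat.div_add_mod]]
      rw [Nat.add_mul_div_left _ _ (Nat.two_pow_pos j),
          Nat.div_eq_of_lt (by omega)]
      omega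
    rw [hnoc, hx0]
    simp


lemma cast_two_pow (n : Nat) : (((2:Nat) ^ n : Nat) : Int) = 2 ^ n := by push_cast; ring

lemma bor_disjoint (k : Nat) (x y : Int) (hx0 : 0 ≤ x) (hx : x < 2 ^ k) (hy0 : 0 ≤ y)
    (hy : (2 ^ k : Int) ∣ y) : PySem.Int.bor x y = x + y := by
  rw [PySem.Int.bor_of_nonneg hx0 hy0]
  have hxe : (x.toNat : Int) = x := Int.toNat_of_nonneg hx0
  have hye : (y.toNat : Int) = y := Int.toNat_of_nonneg hy0
  have hxn : x.toNat < 2 ^ k := by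
    have := cast_two_pow k; omega
  have hyn : 2 ^ k ∣ y.toNat := by
    rw [← Int.natCast_dvd_natCast, hye, cast_two_pow]; exact hy
  rw [nat_lor_disjoint k _ _ hxn hyn]
  push_cast
  omega

lemma band_pow_ne (a : Int) (n : Nat) :
    (PySem.Int.band a ((1 : Int) <<< n) ≠ 0) ↔ (a / 2 ^ n) % 2 = 1 := by
  rw [Int.shiftLeft_eq, one_mul, PySem.Int.band.eq_1]
  by_cases ha : 0 ≤ a
  · rw [if_pos ha, if_pos (by positivity)]
    have h2 : ((2:Int) ^ n).toNat = 2 ^ n := by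
      rw [← cast_two_pow, Int.toNat_natCast]
    rw [h2, Nat.and_two_pow, Nat.testBit_eq_decide_div_mod_eq]
    have hxe : (a.toNat : Int) = a := Int.toNat_of_nonneg ha
    have hdiv : a / 2 ^ n = ((a.toNat / 2 ^ n : Nat) : Int) := by
      rw [Int.natCast_div, hxe, cast_two_pow]
    have hmod : a / 2 ^ n % 2 = ((a.toNat / 2 ^ n % 2 : Nat) : Int) := by
      rw [Int.natCast_emod, ← hdiv]; norm_num
    rw [hmod]
    by_cases hb : a.toNat / 2 ^ n % 2 = 1 <;> simp [hb]
    have hmax : max a 0 = a := by omega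
    have h2d : 2 ∣ a.toNat / 2 ^ n := by omega
    rw [hmax, hdiv]
    exact_mod_cast h2d
  · rw [if_neg ha, if_pos (by positivity)]
    have h2 : ((2:Int) ^ n).toNat = 2 ^ n := by rw [← cast_two_pow, Int.toNat_natCast]
    set m := (-a - 1).toNat with hmdef
    have hme : (m : Int) = -a - 1 := Int.toNat_of_nonneg (by omega)
    rw [h2, Nat.two_pow_and, Nat.testBit_eq_decide_div_mod_eq]
    set q := m / 2 ^ n with hqdef
    set r := m % 2 ^ n with hrdef
    have hm2 : (m : Int) = (q : Int) * 2 ^ n + (r : Int) := by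
      have := (Nat.div_add_mod m (2 ^ n)).symm
      rw [Nat.mul_comm] at this
      exact_mod_cast congrArg (Nat.cast : Nat → Int) this
    have hrlt : r < 2 ^ n := Nat.mod_lt _ (by positivity)
    have hrci : (r : Int) < 2 ^ n := by have := cast_two_pow n; omega
    have ha' : a = (2 ^ n - (r:Int) - 1) + (-(q:Int) - 1) * 2 ^ n := by
      have : a = -(m : Int) - 1 := by omega
      rw [this, hm2]; ring
    have hq : a / 2 ^ n = -(q:Int) - 1 := by
      rw [ha', Int.add_mul_ediv_right _ _ (by positivity : (0:Int) < 2 ^ n).ne',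
          Int.ediv_eq_zero_of_lt (by omega) (by omega), zero_add]
    rw [hq]
    by_cases hb : q % 2 = 1 <;> simp [hb] <;>
      · have := Nat.two_pow_pos n; omega

lemma band_low (a : Int) (n : Nat) :
    PySem.Int.band a (((1 : Int) <<< n) - 1) = a % 2 ^ n := by
  have hp : (0:Int) < 2 ^ n := by positivity
  have hpn : 0 < (2:Nat) ^ n := Nat.two_pow_pos n
  rw [Int.shiftLeft_eq, one_mul, PySem.Int.band.eq_1]
  have h2 : ((2:Int) ^ n - 1).toNat = 2 ^ n - 1 := by
    have := cast_two_pow n; omega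
  by_cases ha : 0 ≤ a
  · rw [if_pos ha, if_pos (by omega)]
    rw [h2, Nat.and_two_pow_sub_one_eq_mod]
    have hxe : (a.toNat : Int) = a := Int.toNat_of_nonneg ha
    rw [Int.natCast_emod, hxe, cast_two_pow]
  · rw [if_neg ha, if_pos (by omega)]
    set m := (-a - 1).toNat with hmdef
    have hme : (m : Int) = -a - 1 := Int.toNat_of_nonneg (by omega)
    rw [h2, Nat.and_comm, Nat.and_two_pow_sub_one_eq_mod]
    set q := m / 2 ^ n with hqdef
    set r := m % 2 ^ n with hrdef
    have hm2 : (m : Int) = (q : Int) * 2 ^ n + (r : Int) := by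
      have := (Nat.div_add_mod m (2 ^ n)).symm
      rw [Nat.mul_comm] at this
      exact_mod_cast congrArg (Nat.cast : Nat → Int) this
    have hrlt : r < 2 ^ n := Nat.mod_lt _ hpn
    have hrci : (r : Int) < 2 ^ n := by have := cast_two_pow n; omega
    have ha' : a = (2 ^ n - (r:Int) - 1) + 2 ^ n * (-(q:Int) - 1) := by
      have h0 : a = -(m : Int) - 1 := by omega
      rw [h0, hm2]; ring
    have hmod : a % 2 ^ n = 2 ^ n - (r:Int) - 1 := by
      rw [ha', Int.add_mul_emod_self_left]
      exact Int.emod_eq_of_lt (by omega) (by omega)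
    rw [hmod]
    have : (r:Int) = ((m % 2 ^ n : Nat) : Int) := by rw [← hrdef]
    omega

lemma range_map_succ (k pos : Nat) :
    (List.range (k + 1)).map (fun i => pos + i)
      = pos :: (List.range k).map (fun i => (pos + 1) + i) := by
  rw [List.range_succ_eq_map]
  simp only [List.map_cons, List.map_map, Function.comp_def, Nat.add_zero]
  congr 1
  exact List.map_congr_left fun i _ => by omega

lemma emod_mul_two_div2 (a b : Int) (hb : 0 < b) : (a % (b * 2)) / 2 = (a / 2) % b := by
  have hr0 : 0 ≤ a % (b * 2) := Int.emod_nonneg a (by omega)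
  have hrlt : a % (b * 2) < b * 2 := Int.emod_lt_of_pos a (by omega)
  have hq : a = a % (b * 2) + (b * (a / (b * 2))) * 2 := by
    have h := Int.emod_add_mul_ediv a (b * 2)
    linarith [h]
  have ha2 : a / 2 = (a % (b * 2)) / 2 + b * (a / (b * 2)) := by
    conv_lhs => rw [hq]
    rw [Int.add_mul_ediv_right _ _ (by norm_num : (2:Int) ≠ 0)]
  rw [ha2, Int.add_mul_emod_self_left]
  exact (Int.emod_eq_of_lt (by omega) (by omega)).symm

lemma emod_succ_div2 (a : Int) (k : Nat) : (a % 2 ^ (k + 1)) / 2 = (a / 2) % 2 ^ k := by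
  rw [pow_succ]
  exact emod_mul_two_div2 a (2 ^ k) (by positivity)

-- Python `a & 1` is `a % 2`
lemma band1 (a : Int) : PySem.Int.band a 1 = a % 2 := by
  rw [PySem.Int.band_one, PySem.Int.mod_eq_emod_of_pos] ; norm_num

lemma ediv_pow_succ (a : Int) (p : Nat) : (a / 2 ^ p) / 2 = a / 2 ^ (p + 1) := by
  rw [Int.ediv_ediv_of_nonneg (by positivity), pow_succ]

lemma depositGo_zero (fuel : Nat) (v : Int) (pos : Nat) : depositGo fuel 0 v pos = 0 := by
  cases fuel <;> simp [depositGo]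

lemma shiftR1 (a : Int) : a >>> (1 : Nat) = a / 2 := by
  simpa using Int.shiftRight_eq_div_pow a 1

-- the recursion only produces a nonnegative value whose bits all lie at positions ≥ pos
lemma depositGo_spec (fuel : Nat) : ∀ (m v : Int) (pos : Nat),
    ∃ t : Int, 0 ≤ t ∧ depositGo fuel m v pos = 2 ^ pos * t := by
  induction fuel with
  | zero => exact fun m v pos => ⟨0, le_rfl, by simp [depositGo]⟩
  | succ fuel ih =>
    intro m v pos
    rw [depositGo]
    by_cases hm : m = 0
    · exact ⟨0, le_rfl, by simp [hm]⟩
    · rw [if_neg hm]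
      by_cases hb : PySem.Int.band m 1 ≠ 0
      · rw [if_pos hb]
        obtain ⟨t, ht0, ht⟩ := ih (m >>> (1:Nat)) (v >>> (1:Nat)) (pos + 1)
        have hp : (0:Int) < 2 ^ pos := by positivity
        refine ⟨v % 2 + 2 * t, by omega, ?_⟩
        rw [band1, Int.shiftLeft_eq, ht,
            bor_disjoint (pos + 1) _ _ (mul_nonneg (by omega) (by positivity))
              (by have h1 : v % 2 ≤ 1 := by omega
                  have h2 : (v % 2) * 2 ^ pos ≤ 2 ^ pos := by nlinarith
                  have h3 : (2:Int) ^ (pos+1) = 2 ^ pos * 2 := pow_succ 2 pos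
                  omega)
              (by positivity) ⟨t, rfl⟩]
        rw [pow_succ]; ring
      · rw [if_neg hb]
        obtain ⟨t, ht0, ht⟩ := ih (m >>> (1:Nat)) v (pos + 1)
        exact ⟨2 * t, by omega, by rw [ht, pow_succ]; ring⟩

lemma main_fold (mask value : Int) : ∀ (k : Nat), ∀ (pos vi : Nat) (accum : Int),
    0 ≤ accum → accum < 2 ^ pos →
    (((List.range k).map (fun i => pos + i)).foldl (depositStep mask value) (accum, vi)).1
      = accum + depositGo k ((mask / 2 ^ pos) % 2 ^ k) (value / 2 ^ vi) pos := by
  intro k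
  induction k with
  | zero => intro pos vi accum _ _; simp [depositGo]
  | succ k ih =>
    intro pos vi accum h0 h1
    have hp : (0:Int) < 2 ^ pos := by positivity
    have hk1 : (0:Int) < 2 ^ (k+1) := by positivity
    set m := (mask / 2 ^ pos) % 2 ^ (k+1) with hmdef
    have hm0 : 0 ≤ m := Int.emod_nonneg _ (by omega)
    have hmpar : m % 2 = (mask / 2 ^ pos) % 2 := Int.emod_emod_of_dvd _ ⟨2 ^ k, by rw [pow_succ]; ring⟩
    have hnext : m / 2 = (mask / 2 ^ (pos+1)) % 2 ^ k := by
      rw [hmdef, emod_succ_div2, ediv_pow_succ]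
    have hvnext : (value / 2 ^ vi) / 2 = value / 2 ^ (vi+1) := ediv_pow_succ value vi
    rw [range_map_succ, List.foldl_cons]
    by_cases hbit : PySem.Int.band mask ((1:Int) <<< pos) ≠ 0
    · -- mask bit pos is set
      have hpar : (mask / 2 ^ pos) % 2 = 1 := (band_pow_ne mask pos).mp hbit
      have hmne : m ≠ 0 := by omega
      have hgoband : PySem.Int.band m 1 ≠ 0 := by rw [band1]; omega
      rw [depositGo, if_neg hmne, if_pos hgoband, shiftR1, shiftR1, hnext]
      by_cases hv : PySem.Int.band value ((1:Int) <<< vi) ≠ 0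
      · -- value bit vi is set
        have hvpar : (value / 2 ^ vi) % 2 = 1 := (band_pow_ne value vi).mp hv
        have hstep : depositStep mask value (accum, vi) pos
            = (accum + 2 ^ pos, vi + 1) := by
          unfold depositStep
          rw [if_pos hbit, if_pos hv, Int.shiftLeft_eq, one_mul,
              bor_disjoint pos accum (2 ^ pos) h0 h1 (by positivity) ⟨1, by ring⟩]
        rw [hstep, ih (pos+1) (vi+1) (accum + 2 ^ pos) (by omega)
              (by have := pow_succ (2:Int) pos; omega)]
        rw [band1, hvpar, Int.shiftLeft_eq, one_mul, hvnext]
        obtain ⟨t, ht0, ht⟩ :=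
          depositGo_spec k (mask / 2 ^ (pos+1) % 2 ^ k) (value / 2 ^ (vi+1)) (pos + 1)
        rw [ht, bor_disjoint (pos+1) (2 ^ pos) _ (by positivity)
              (by have := pow_succ (2:Int) pos; omega) (by positivity) ⟨t, rfl⟩]
        ring
      · -- value bit vi is clear
        have hvpar : (value / 2 ^ vi) % 2 = 0 := by
          have h01 : (value / 2 ^ vi) % 2 = 0 ∨ (value / 2 ^ vi) % 2 = 1 := by omega
          rcases h01 with h | h
          · exact h
          · exact absurd ((band_pow_ne value vi).mpr h) hv
        have hstep : depositStep mask value (accum, vi) pos = (accum, vi + 1) := by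
          unfold depositStep
          rw [if_pos hbit, if_neg hv]
        rw [hstep, ih (pos+1) (vi+1) accum h0 (by have := pow_succ (2:Int) pos; omega)]
        rw [band1, hvpar, hvnext]
        have hz : ((0:Int)) <<< pos = 0 := by rw [Int.shiftLeft_eq]; ring
        rw [hz, PySem.Int.bor_comm, PySem.Int.bor_zero]
    · -- mask bit pos is clear
      have hpar : (mask / 2 ^ pos) % 2 = 0 := by
        have h01 : (mask / 2 ^ pos) % 2 = 0 ∨ (mask / 2 ^ pos) % 2 = 1 := by omega
        rcases h01 with h | h
        · exact h
        · exact absurd ((band_pow_ne mask pos).mpr h) hbit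
      have hstep : depositStep mask value (accum, vi) pos = (accum, vi) := by
        unfold depositStep
        rw [if_neg hbit]
      rw [hstep, ih (pos+1) vi accum h0 (by have := pow_succ (2:Int) pos; omega)]
      by_cases hmz : m = 0
      · rw [hmz, depositGo_zero]
        have : (mask / 2 ^ (pos+1)) % 2 ^ k = 0 := by
          rw [← hnext, hmz]; norm_num
        rw [this, depositGo_zero]
      · have hgoband : ¬ PySem.Int.band m 1 ≠ 0 := by rw [band1]; omega
        rw [depositGo, if_neg hmz, if_neg hgoband, shiftR1, hnext]

-- ===== VERDICT (by name: the statement is the Claim_ definition above) =====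
theorem deposit_bits_spec : Claim_equal_deposit_bits := by
  intro mask value _
  show deposit_bits mask value = deposit_bits_alt mask value
  unfold deposit_bits deposit_bits_alt
  have hr : List.range 128 = (List.range 128).map (fun i => 0 + i) := by simp
  rw [hr, main_fold mask value 128 0 0 0 le_rfl (by norm_num), band_low]
  norm_num
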